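-- pv_equiv track=rewrite | github.com/taplowtech/adventofcode2020 | day14.py | calc_sum2
-- ===== SOURCE A (Python) =====
-- def combine_mask2(mask, i):
--     p = 35
--     base = 0
--     m = 1
--     xpos = []
--     while p >= 0:
--         v = i % 2
--         i = int(i/2)
--         if mask[p] == 'X':
--             xpos.append(m)
--         else:
--             if v == 1 or mask[p] == '1':
--                 base += m
--
--         m = m*2
--         p -= 1
--
--     memlocs = []
--     for a in range(0, pow(2, len(xpos))):
--         p = 0
--         m = base
--         d = a
--         while d > 0:
--             if (d % 2):
--                 m += xpos[p]
--             p += 1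
--             d = int(d/2)
--         memlocs.append(m)
--     return memlocs
--
-- def calc_sum2(input):
--     mem = {}
--     for i in input:
--         if 'mask' in i:
--             mask = i.split(' = ')[1]
--         elif 'mem' in i:
--             v = int(i.split(' = ')[1])
--             a = int(i.split('mem[', 1)[1].split(']', 1)[0])
--             for m in combine_mask2(mask, a):
--                 mem[m] = v
--     s = 0
--     for m in mem:
--         s += mem[m]
--     return s
-- ===== SOURCE B (Python) =====
-- def subtract(c, d):
--     # pieces (disjoint cubes) whose union is c \ d; cubes are LSB-first
--     # lists over '0' / '1' / 'X'
--     if not c: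
--         return []
--     x, y = c[0], d[0]
--     if x != 'X' and y != 'X' and x != y:
--         return [c]                       # the cubes are already disjoint
--     rest = subtract(c[1:], d[1:])
--     if x == 'X' and y != 'X':
--         flip = '0' if y == '1' else '1'
--         return [[flip] + c[1:]] + [[y] + r for r in rest]
--     return [[x] + r for r in rest]
--
--
-- def calc_sum2(input):
--     # Keep memory as a union of DISJOINT address cubes (36 trits, LSB first):
--     # each write cube is subtracted from every stored cube, then appended.
--     # No address is ever enumerated; the sum is value * 2**(number of X).
--     mem = []
--     mask = ''
--     for line in input:
--         if 'mask' in line: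
--             mask = line.split(' = ')[1]
--         elif 'mem' in line:
--             v = int(line.split(' = ')[1])
--             a = int(line.split('mem[', 1)[1].split(']', 1)[0])
--             cube = []
--             for j in range(36):
--                 ch = mask[35 - j]
--                 if ch == 'X':
--                     cube.append('X')
--                 elif ch == '1' or (a >> j) & 1:
--                     cube.append('1')
--                 else:
--                     cube.append('0')
--             mem = [(p, val) for (c, val) in mem for p in subtract(c, cube)]
--             mem.append((cube, v))
--     return sum(val * 2 ** c.count('X') for (c, val) in mem)
-- ===== Notes on version B (the rewrite author's own statement) =====
-- stated objective: alternative
-- what changed: B never enumerates the 2^k floating addresses: it keeps memory as a list of disjoint 36-trit address cubes, subtracts each new write-cube from every stored cube (cube splitting), appends the new cube, and sums value * 2^(number of X trits) at the end, replacing A's per-address expansion plus last-write-wins dict.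
import Mathlib
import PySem

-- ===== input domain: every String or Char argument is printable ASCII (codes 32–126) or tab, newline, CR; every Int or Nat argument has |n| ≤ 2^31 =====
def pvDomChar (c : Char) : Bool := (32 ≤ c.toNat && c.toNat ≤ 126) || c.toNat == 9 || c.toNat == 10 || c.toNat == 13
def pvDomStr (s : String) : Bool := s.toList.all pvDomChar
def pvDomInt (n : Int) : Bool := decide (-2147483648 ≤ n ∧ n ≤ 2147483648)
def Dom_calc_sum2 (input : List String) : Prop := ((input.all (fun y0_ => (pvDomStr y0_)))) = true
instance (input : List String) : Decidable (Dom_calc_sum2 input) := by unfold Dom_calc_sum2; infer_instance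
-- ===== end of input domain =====

-- B never enumerates the 2^k floating addresses: it keeps memory as a list of
-- disjoint 36-trit address cubes, subtracts each new write cube from every
-- stored cube, and sums value * 2^(number of X trits) at the end.

-- ===== PORT A =====

-- A's 'while p >= 0' loop in combine_mask2, one step per p of range(35, -1, -1);
-- state (i, base, m, xpos).  int(i/2) is PySem.Int.truncdiv (exact for |i| < 2^53,
-- which Pre_ guarantees); mask[p] is pyGetD (Pre_ guarantees p is in range).
def a_maskStep (mask : List Char) (st : Int × Int × Int × List Int) (p : Int) :
    Int × Int × Int × List Int :=
  let v := PySem.Int.mod st.1 2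
  let i' := PySem.Int.truncdiv st.1 2
  if PySem.List.pyGetD mask p ' ' = 'X' then
    (i', st.2.1, st.2.2.1 * 2, st.2.2.2 ++ [st.2.2.1])
  else if v = 1 ∨ PySem.List.pyGetD mask p ' ' = '1' then
    (i', st.2.1 + st.2.2.1, st.2.2.1 * 2, st.2.2.2)
  else
    (i', st.2.1, st.2.2.1 * 2, st.2.2.2)

-- A's inner 'while d > 0' loop; d is nonnegative there (it starts at a value of
-- range(0, 2**len(xpos))), so it is carried as a Nat and 'int(d/2)' is Nat division.
def a_inner (xpos : List Int) : Nat → Int → Int → Int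
  | 0, _, m => m
  | (d+1), p, m =>
      a_inner xpos ((d+1)/2) (p+1)
        (if (d+1) % 2 = 1 then m + PySem.List.pyGetD xpos p 0 else m)
  termination_by d => d
  decreasing_by omega

def combine_mask2 (mask : String) (i : Int) : List Int :=
  let st := (PySem.List.pyRange 35 (-1) (-1)).foldl (a_maskStep mask.toList) (i, 0, 1, [])
  let base := st.2.1
  let xpos := st.2.2.2
  (PySem.List.pyRange 0 ((2:Int) ^ xpos.length) 1).foldl
    (fun memlocs a => memlocs ++ [a_inner xpos a.toNat 0 base]) []

-- one line of A's main loop; state (mask, mem)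
def a_line (st : String × PySem.Dict Int Int) (line : String) : String × PySem.Dict Int Int :=
  if PySem.Str.isIn "mask" line then
    (PySem.List.pyGetD ((PySem.Str.split? line " = ").getD []) 1 "", st.2)
  else if PySem.Str.isIn "mem" line then
    let v := (PySem.Int.ofStr? (PySem.List.pyGetD ((PySem.Str.split? line " = ").getD []) 1 "")).getD 0
    let astr := PySem.List.pyGetD
        ((PySem.Str.splitMax? (PySem.List.pyGetD ((PySem.Str.splitMax? line "mem[" 1).getD []) 1 "") "]" 1).getD [])
        0 ""
    let a := (PySem.Int.ofStr? astr).getD 0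
    (st.1, (combine_mask2 st.1 a).foldl (fun d m => d.insert m v) st.2)
  else st

def calc_sum2 (input : List String) : Int :=
  let st := input.foldl a_line ("", PySem.Dict.empty)
  st.2.keys.foldl (fun s m => s + st.2.getD m 0) 0

-- ===== PORT B =====

-- B's recursive cube subtraction: the pieces (disjoint cubes) whose union is c \ d.
def subCube : List Char → List Char → List (List Char)
  | [], _ => []
  | _ :: _, [] => []          -- unreachable: all cubes have 36 trits
  | x :: c', y :: d' =>
    if x ≠ 'X' ∧ y ≠ 'X' ∧ x ≠ y then [x :: c']
    else if x = 'X' ∧ y ≠ 'X' then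
      ((if y = '1' then '0' else '1') :: c') :: (subCube c' d').map (y :: ·)
    else (subCube c' d').map (x :: ·)

-- B's per-write cube: 36 trits, LSB first ('for j in range(36): cube.append(…)')
def b_cube (mask : String) (a : Int) : List Char :=
  (PySem.List.pyRange 0 36 1).foldl
    (fun cube j =>
      let ch := PySem.List.pyGetD mask.toList (35 - j) ' '
      if ch = 'X' then cube ++ ['X']
      else if ch = '1' ∨ PySem.Int.band (a >>> j.toNat) 1 ≠ 0 then cube ++ ['1']
      else cube ++ ['0']) []

-- one line of B's loop; state (mask, mem : disjoint cubes with values)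
def b_line (st : String × List (List Char × Int)) (line : String) :
    String × List (List Char × Int) :=
  if PySem.Str.isIn "mask" line then
    (PySem.List.pyGetD ((PySem.Str.split? line " = ").getD []) 1 "", st.2)
  else if PySem.Str.isIn "mem" line then
    let v := (PySem.Int.ofStr? (PySem.List.pyGetD ((PySem.Str.split? line " = ").getD []) 1 "")).getD 0
    let astr := PySem.List.pyGetD
        ((PySem.Str.splitMax? (PySem.List.pyGetD ((PySem.Str.splitMax? line "mem[" 1).getD []) 1 "") "]" 1).getD [])
        0 ""
    let a := (PySem.Int.ofStr? astr).getD 0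
    let cube := b_cube st.1 a
    (st.1, (st.2.flatMap (fun p => (subCube p.1 cube).map (fun q => (q, p.2)))) ++ [(cube, v)])
  else st

def calc_sum2_alt (input : List String) : Int :=
  let mem := (input.foldl b_line ("", [])).2
  mem.foldl (fun s p => s + p.2 * 2 ^ (PySem.List.count p.1 'X')) 0

-- ===== PRECONDITION & SPEC =====

-- Pre_ checks each line of the input once, threading only the mask currently in
-- effect: a 'mask' line must contain ' = '; a 'mem' line must come after a mask
-- line whose mask has at least 36 characters, must contain ' = ' with an int after
-- it and 'mem[' with an int after it, and that address must be nonnegative and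
-- below 2^53.  Lines on which A raises (NameError / IndexError / ValueError) are
-- excluded; addresses outside [0, 2^53) — on which A still returns — are outside
-- the task's 36-bit address domain, where A's int(i/2) float halving and Python's
-- floor-mod on negatives produce accidental addresses that B does not mimic.
def preOk : Option String → List String → Bool
  | _, [] => true
  | om, line :: rest =>
    if PySem.Str.isIn "mask" line then
      decide (2 ≤ ((PySem.Str.split? line " = ").getD []).length) &&
      preOk (some (PySem.List.pyGetD ((PySem.Str.split? line " = ").getD []) 1 "")) rest
    else if PySem.Str.isIn "mem" line then
      match om with
      | none => false
      | some mask =>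
        decide (36 ≤ mask.toList.length) &&
        decide (2 ≤ ((PySem.Str.split? line " = ").getD []).length) &&
        (PySem.Int.ofStr? (PySem.List.pyGetD ((PySem.Str.split? line " = ").getD []) 1 "")).isSome &&
        decide (2 ≤ ((PySem.Str.splitMax? line "mem[" 1).getD []).length) &&
        (match PySem.Int.ofStr? (PySem.List.pyGetD
            ((PySem.Str.splitMax? (PySem.List.pyGetD ((PySem.Str.splitMax? line "mem[" 1).getD []) 1 "") "]" 1).getD [])
            0 "") with
         | some a => decide (0 ≤ a ∧ a < 2 ^ 53)
         | none => false) &&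
        preOk om rest
    else preOk om rest

def Pre_calc_sum2 (input : List String) : Prop := preOk none input = true
instance (input : List String) : Decidable (Pre_calc_sum2 input) := by
  unfold Pre_calc_sum2; infer_instance

def pvWitness_calc_sum2 : List String :=
  ["mask = 0000000000000000000000000000000000XX", "mem[8] = 11", "mem[7] = 3"]

def Spec_calc_sum2 (input : List String) (out : Int) : Prop := out = calc_sum2_alt input
instance (input : List String) (out : Int) : Decidable (Spec_calc_sum2 input out) := by
  unfold Spec_calc_sum2; infer_instance

-- ===== CLAIM (what is proved, stated in full; the proofs are below) =====
def Claim_equal_calc_sum2 : Prop :=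
  ∀ (input : List String), Dom_calc_sum2 input → Pre_calc_sum2 input →
    Spec_calc_sum2 input (calc_sum2 input)

-- ===== LEMMAS AND PROOFS =====

def cmt : List Char → Nat → Bool
  | [], a => a == 0
  | c :: r, a =>
      (if c = 'X' then true else if c = '1' then a % 2 == 1 else a % 2 == 0) && cmt r (a / 2)

def hOk (c : Char) (a : Nat) : Bool :=
  if c = 'X' then true else if c = '1' then a % 2 == 1 else a % 2 == 0

theorem cmt_cons (c : Char) (r : List Char) (a : Nat) :
    cmt (c :: r) a = (hOk c a && cmt r (a / 2)) := rfl

theorem subCube_sem (c : List Char) : ∀ (d : List Char), c.length = d.length →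
    (∀ ch ∈ c, ch = '0' ∨ ch = '1' ∨ ch = 'X') →
    (∀ ch ∈ d, ch = '0' ∨ ch = '1' ∨ ch = 'X') → ∀ (a : Nat),
    ((∃ p ∈ subCube c d, cmt p a = true) ↔ (cmt c a = true ∧ cmt d a = false)) := by
  induction c with
  | nil =>
    intro d hlen _ _ a
    have : d = [] := List.length_eq_zero_iff.mp (by simpa using hlen.symm)
    subst this
    simp [subCube, cmt]
  | cons x c' ih =>
    intro d hlen hc hd a
    match d with
    | [] => simp at hlen
    | y :: d' =>
      have hlen' : c'.length = d'.length := by simpa using hlen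
      have hx := hc x (by simp)
      have hy := hd y (by simp)
      have ihr := ih d' hlen' (fun ch h => hc ch (by simp [h])) (fun ch h => hd ch (by simp [h])) (a / 2)
      by_cases h1 : x ≠ 'X' ∧ y ≠ 'X' ∧ x ≠ y
      · -- disjoint heads
        have hhd : hOk y a = !hOk x a := by
          rcases hx with rfl | rfl | rfl <;> rcases hy with rfl | rfl | rfl <;>
            first
              | exact absurd rfl h1.1
              | exact absurd rfl h1.2.1
              | exact absurd rfl h1.2.2
              | (rcases Nat.mod_two_eq_zero_or_one a with h | h <;> simp [hOk, h])
        rw [subCube, if_pos h1]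
        simp only [List.mem_singleton, exists_eq_left, cmt_cons, Bool.and_eq_true,
          Bool.and_eq_false_iff, hhd]
        constructor
        · rintro ⟨hh, hr⟩; exact ⟨⟨hh, hr⟩, Or.inl (by simp [hh])⟩
        · rintro ⟨⟨hh, hr⟩, _⟩; exact ⟨hh, hr⟩
      · by_cases h2 : x = 'X' ∧ y ≠ 'X'
        · obtain ⟨rfl, hy'⟩ := h2
          have hflip : hOk (if y = '1' then '0' else '1') a = !hOk y a := by
            rcases hy with rfl | rfl | rfl <;>
              first
                | exact absurd rfl hy'
                | (rcases Nat.mod_two_eq_zero_or_one a with h | h <;> simp [hOk, h])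
          rw [subCube, if_neg h1, if_pos ⟨rfl, hy'⟩]
          simp only [List.mem_cons, List.mem_map, exists_eq_or_imp, cmt_cons, hflip]
          constructor
          · rintro (hp | ⟨r, hr, hrm⟩)
            · simp only [Bool.and_eq_true, Bool.not_eq_eq_eq_not, Bool.not_true] at hp
              refine ⟨by simp [hOk, hp.2], ?_⟩
              simp [hp.1]
            · rcases hr with ⟨rr, hrr, rfl⟩
              simp only [cmt_cons, Bool.and_eq_true] at hrm
              have := ihr.mp ⟨rr, hrr, hrm.2⟩
              refine ⟨by simp [hOk, this.1], ?_⟩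
              simp [this.2]
          · rintro ⟨hcm, hdm⟩
            have hcm : cmt c' (a / 2) = true := by simpa [hOk] using hcm
            simp only [Bool.and_eq_false_iff] at hdm
            cases hyo : hOk y a with
            | false => exact Or.inl (by simp [hcm])
            | true =>
              have hdm' : cmt d' (a / 2) = false := by
                rcases hdm with h | h
                · rw [hyo] at h; simp at h
                · exact h
              obtain ⟨r, hr, hrm⟩ := ihr.mpr ⟨hcm, hdm'⟩
              exact Or.inr ⟨_, ⟨r, hr, rfl⟩, by simp [cmt_cons, hyo, hrm]⟩
        · -- heads compatible: x = y, or y = 'X', or x = 'X' = y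
          have hhd : hOk x a = true → hOk y a = true := by
            rcases hx with rfl | rfl | rfl <;> rcases hy with rfl | rfl | rfl <;>
              first
                | exact absurd ⟨by decide, by decide, by decide⟩ h1
                | exact absurd ⟨rfl, by decide⟩ h2
                | exact id
                | (intro _; simp [hOk])
          rw [subCube, if_neg h1, if_neg h2]
          simp only [List.mem_map]
          constructor
          · rintro ⟨p, ⟨r, hr, rfl⟩, hpm⟩
            simp only [cmt_cons, Bool.and_eq_true] at hpm
            have := ihr.mp ⟨r, hr, hpm.2⟩
            exact ⟨by simp [cmt_cons, hpm.1, this.1],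
              by simp [cmt_cons, this.2]⟩
          · rintro ⟨hcm, hdm⟩
            simp only [cmt_cons, Bool.and_eq_true] at hcm
            have hyo : hOk y a = true := hhd hcm.1
            simp only [cmt_cons, hyo, Bool.true_and] at hdm
            obtain ⟨r, hr, hrm⟩ := ihr.mpr ⟨hcm.2, hdm⟩
            exact ⟨_, ⟨r, hr, rfl⟩, by simp [cmt_cons, hcm.1, hrm]⟩

theorem hOk_flip (y : Char) (hy' : y ≠ 'X') (a : Nat) :
    hOk (if y = '1' then '0' else '1') a = !hOk y a := by
  have hpar := Nat.mod_two_eq_zero_or_one a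
  by_cases hy1 : y = '1'
  · subst hy1; rcases hpar with h | h <;> simp [hOk, h]
  · rcases hpar with h | h <;> simp [hOk, hy', hy1, h]

theorem subCube_shape (c : List Char) : ∀ (d : List Char),
    (∀ ch ∈ c, ch = '0' ∨ ch = '1' ∨ ch = 'X') →
    (∀ ch ∈ d, ch = '0' ∨ ch = '1' ∨ ch = 'X') →
    ∀ p ∈ subCube c d, p.length = c.length ∧ ∀ ch ∈ p, ch = '0' ∨ ch = '1' ∨ ch = 'X' := by
  induction c with
  | nil => intro d _ _ p hp; simp [subCube] at hp
  | cons x c' ih =>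
    intro d hc hd p hp
    match d with
    | [] => simp [subCube] at hp
    | y :: d' =>
      have hx := hc x (by simp)
      have hy := hd y (by simp)
      have htl : ∀ ch ∈ c', ch = '0' ∨ ch = '1' ∨ ch = 'X' := fun ch h => hc ch (by simp [h])
      have ihr := ih d' htl (fun ch h => hd ch (by simp [h]))
      have hcons : ∀ (z : Char), (z = '0' ∨ z = '1' ∨ z = 'X') →
          ∀ q ∈ (subCube c' d').map (z :: ·),
            q.length = (x :: c').length ∧ ∀ ch ∈ q, ch = '0' ∨ ch = '1' ∨ ch = 'X' := by
        intro z hz q hq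
        simp only [List.mem_map] at hq
        obtain ⟨r, hr, rfl⟩ := hq
        obtain ⟨hlen, hwf⟩ := ihr r hr
        refine ⟨by simp [hlen], ?_⟩
        intro ch hch
        rcases List.mem_cons.mp hch with rfl | h
        · exact hz
        · exact hwf ch h
      rw [subCube] at hp
      by_cases h1 : x ≠ 'X' ∧ y ≠ 'X' ∧ x ≠ y
      · rw [if_pos h1] at hp
        simp only [List.mem_singleton] at hp
        subst hp
        exact ⟨rfl, hc⟩
      · rw [if_neg h1] at hp
        by_cases h2 : x = 'X' ∧ y ≠ 'X'
        · rw [if_pos h2] at hp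
          rcases List.mem_cons.mp hp with rfl | hmem
          · refine ⟨by simp, ?_⟩
            intro ch hch
            rcases List.mem_cons.mp hch with rfl | h
            · by_cases hy1 : y = '1' <;> simp [hy1]
            · exact htl ch h
          · exact hcons y hy p hmem
        · rw [if_neg h2] at hp
          exact hcons x hx p hp

theorem subCube_pairwise (c : List Char) : ∀ (d : List Char),
    (subCube c d).Pairwise (fun p q => ∀ a, ¬(cmt p a = true ∧ cmt q a = true)) := by
  induction c with
  | nil => intro d; simp [subCube]
  | cons x c' ih =>
    intro d
    match d with
    | [] => simp [subCube]
    | y :: d' =>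
      have ihr := ih d'
      have hmap : ∀ z : Char,
          ((subCube c' d').map (z :: ·)).Pairwise
            (fun p q => ∀ a, ¬(cmt p a = true ∧ cmt q a = true)) := by
        intro z
        rw [List.pairwise_map]
        exact ihr.imp (by
          intro p q h a hpq
          simp only [cmt_cons, Bool.and_eq_true] at hpq
          exact h (a / 2) ⟨hpq.1.2, hpq.2.2⟩)
      rw [subCube]
      by_cases h1 : x ≠ 'X' ∧ y ≠ 'X' ∧ x ≠ y
      · rw [if_pos h1]; simp
      · rw [if_neg h1]
        by_cases h2 : x = 'X' ∧ y ≠ 'X'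
        · rw [if_pos h2]
          refine List.Pairwise.cons ?_ (hmap y)
          intro q hq a hpq
          simp only [List.mem_map] at hq
          obtain ⟨r, _, rfl⟩ := hq
          obtain ⟨hp, hq'⟩ := hpq
          simp only [cmt_cons, Bool.and_eq_true] at hp hq'
          rw [hOk_flip y h2.2 a, hq'.1] at hp
          simp at hp
        · rw [if_neg h2]
          exact hmap x

def memVal : List (List Char × Int) → Nat → Int
  | [], _ => 0
  | e :: r, a => if cmt e.1 a then e.2 else memVal r a

def WfCube (c : List Char) : Prop := c.length = 36 ∧ ∀ ch ∈ c, ch = '0' ∨ ch = '1' ∨ ch = 'X'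
def WfMem (mem : List (List Char × Int)) : Prop := ∀ p ∈ mem, WfCube p.1
def DisjMem (mem : List (List Char × Int)) : Prop :=
  mem.Pairwise (fun p q => ∀ a, ¬(cmt p.1 a = true ∧ cmt q.1 a = true))

theorem memVal_append_skip (l1 l2 : List (List Char × Int)) (a : Nat)
    (h : ∀ p ∈ l1, cmt p.1 a = false) : memVal (l1 ++ l2) a = memVal l2 a := by
  induction l1 with
  | nil => rfl
  | cons e r ih =>
    simp only [List.cons_append, memVal, h e (by simp), Bool.false_eq_true, if_false]
    exact ih (fun p hp => h p (by simp [hp]))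

theorem memVal_append_hit (l1 l2 : List (List Char × Int)) (a : Nat) (v0 : Int)
    (hex : ∃ p ∈ l1, cmt p.1 a = true) (hall : ∀ p ∈ l1, p.2 = v0) :
    memVal (l1 ++ l2) a = v0 := by
  induction l1 with
  | nil => simp at hex
  | cons e r ih =>
    simp only [List.cons_append, memVal]
    cases he : cmt e.1 a with
    | true => simp [hall e (by simp)]
    | false =>
      simp only [Bool.false_eq_true, if_false]
      obtain ⟨p, hp, hpm⟩ := hex
      rcases List.mem_cons.mp hp with rfl | hp'
      · rw [he] at hpm; simp at hpm
      · exact ih ⟨p, hp', hpm⟩ (fun p hp => hall p (by simp [hp]))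

theorem piece_wf {c cube : List Char} (hc : WfCube c) (hcube : WfCube cube) :
    ∀ q ∈ subCube c cube, WfCube q := by
  intro q hq
  obtain ⟨hl, hwf⟩ := subCube_shape c cube hc.2 hcube.2 q hq
  exact ⟨hl.trans hc.1, hwf⟩

theorem piece_sem {c cube : List Char} (hc : WfCube c) (hcube : WfCube cube) (a : Nat) :
    (∃ q ∈ subCube c cube, cmt q a = true) ↔ (cmt c a = true ∧ cmt cube a = false) :=
  subCube_sem c cube (hc.1.trans hcube.1.symm) hc.2 hcube.2 a

theorem write_memVal (mem : List (List Char × Int)) (cube : List Char) (v : Int)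
    (hw : WfMem mem) (hcube : WfCube cube) (a : Nat) :
    memVal ((mem.flatMap (fun p => (subCube p.1 cube).map (fun q => (q, p.2)))) ++ [(cube, v)]) a
      = if cmt cube a then v else memVal mem a := by
  induction mem with
  | nil => simp [memVal]
  | cons e rest ih =>
    have hwe : WfCube e.1 := hw e (by simp)
    have hwr : WfMem rest := fun p hp => hw p (by simp [hp])
    rw [List.flatMap_cons, List.append_assoc]
    cases hcb : cmt cube a with
    | true =>
      rw [memVal_append_skip _ _ a (by
        intro p hp
        simp only [List.mem_map] at hp
        obtain ⟨q, hq, rfl⟩ := hp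
        by_contra hne
        have : cmt q a = true := by simpa using hne
        exact absurd hcb (by simp [((piece_sem hwe hcube a).mp ⟨q, hq, this⟩).2]))]
      rw [ih hwr]
      simp [hcb]
    | false =>
      cases hce : cmt e.1 a with
      | true =>
        rw [memVal_append_hit _ _ a e.2 ?hex ?hall]
        · simp [memVal, hce]
        case hex =>
          obtain ⟨q, hq, hqm⟩ := (piece_sem hwe hcube a).mpr ⟨hce, hcb⟩
          exact ⟨(q, e.2), List.mem_map.mpr ⟨q, hq, rfl⟩, hqm⟩
        case hall =>
          intro p hp
          simp only [List.mem_map] at hp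
          obtain ⟨q, _, rfl⟩ := hp
          rfl
      | false =>
        rw [memVal_append_skip _ _ a (by
          intro p hp
          simp only [List.mem_map] at hp
          obtain ⟨q, hq, rfl⟩ := hp
          by_contra hne
          have : cmt q a = true := by simpa using hne
          exact absurd hce (by simp [((piece_sem hwe hcube a).mp ⟨q, hq, this⟩).1]))]
        rw [ih hwr]
        simp [memVal, hcb, hce]

theorem write_wf (mem : List (List Char × Int)) (cube : List Char) (v : Int)
    (hw : WfMem mem) (hcube : WfCube cube) :
    WfMem ((mem.flatMap (fun p => (subCube p.1 cube).map (fun q => (q, p.2)))) ++ [(cube, v)]) := by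
  intro p hp
  rcases List.mem_append.mp hp with hp | hp
  · simp only [List.mem_flatMap, List.mem_map] at hp
    obtain ⟨e, he, q, hq, rfl⟩ := hp
    exact piece_wf (hw e he) hcube q hq
  · simp only [List.mem_singleton] at hp
    subst hp
    exact hcube

theorem write_disj (mem : List (List Char × Int)) (cube : List Char) (v : Int)
    (hw : WfMem mem) (hdj : DisjMem mem) (hcube : WfCube cube) :
    DisjMem ((mem.flatMap (fun p => (subCube p.1 cube).map (fun q => (q, p.2)))) ++ [(cube, v)]) := by
  rw [DisjMem, List.pairwise_append]
  refine ⟨?_, by simp, ?_⟩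
  · -- the subtracted pieces are pairwise disjoint
    induction mem with
    | nil => simp
    | cons e rest ih =>
      have hwe : WfCube e.1 := hw e (by simp)
      have hwr : WfMem rest := fun p hp => hw p (by simp [hp])
      have hdr : DisjMem rest := hdj.sublist (List.sublist_cons_self e rest)
      rw [List.flatMap_cons, List.pairwise_append]
      refine ⟨?_, ih hwr hdr, ?_⟩
      · rw [List.pairwise_map]
        exact (subCube_pairwise e.1 cube).imp (by
          intro p q h a hpq
          exact h a hpq)
      · intro p hp q hq a hpq
        simp only [List.mem_map] at hp
        obtain ⟨qp, hqp, rfl⟩ := hp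
        simp only [List.mem_flatMap, List.mem_map] at hq
        obtain ⟨e', he', qq, hqq, rfl⟩ := hq
        have h1 := ((piece_sem hwe hcube a).mp ⟨qp, hqp, hpq.1⟩).1
        have h2 := ((piece_sem (hwr e' he') hcube a).mp ⟨qq, hqq, hpq.2⟩).1
        exact (List.pairwise_cons.mp hdj).1 e' he' a ⟨h1, h2⟩
  · intro p hp q hq a hpq
    simp only [List.mem_singleton] at hq
    subst hq
    simp only [List.mem_flatMap, List.mem_map] at hp
    obtain ⟨e, he, qp, hqp, rfl⟩ := hp
    have := ((piece_sem (hw e he) hcube a).mp ⟨qp, hqp, hpq.1⟩).2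
    rw [hpq.2] at this
    simp at this

theorem range_double {α : Type} (g : Nat → α) :
    ∀ n, (List.range (2 * n)).map g
      = (List.range n).flatMap (fun c => [g (2 * c), g (2 * c + 1)]) := by
  intro n
  induction n with
  | zero => simp
  | succ n ih =>
    rw [show 2*(n+1) = (2*n+1)+1 by ring, List.range_succ, List.range_succ, List.range_succ]
    simp [ih]

theorem sum_flatMap_int {α : Type} (l : List α) (f : α → List Int) :
    (l.flatMap f).sum = (l.map (fun x => (f x).sum)).sum := by
  induction l with
  | nil => simp
  | cons x t ih => simp [List.flatMap_cons, ih]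

theorem cube_sum (c : List Char) : ∀ (v : Int),
    ((List.range (2 ^ c.length)).map (fun a => if cmt c a then v else 0)).sum
      = v * 2 ^ (c.count 'X') := by
  induction c with
  | nil => intro v; simp [cmt]
  | cons ch r ih =>
    intro v
    rw [show (ch :: r).length = r.length + 1 from rfl, pow_succ,
        show (2:Nat) ^ r.length * 2 = 2 * 2 ^ r.length by ring, range_double]
    rw [sum_flatMap_int]
    have hterm : ∀ b : Nat,
        ((if cmt (ch :: r) (2*b) then v else 0) + ((if cmt (ch :: r) (2*b+1) then v else 0) + 0))
          = if cmt r b then (if ch = 'X' then 2 * v else v) else 0 := by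
      intro b
      have h0 : (2*b) % 2 = 0 := by omega
      have h1 : (2*b) / 2 = b := by omega
      have h2 : (2*b+1) % 2 = 1 := by omega
      have h3 : (2*b+1) / 2 = b := by omega
      simp only [cmt_cons, hOk, h0, h1, h2, h3]
      by_cases hX : ch = 'X' <;> by_cases h1' : ch = '1' <;>
        cases hr : cmt r b <;> simp [hX, h1'] <;> ring
    calc ((List.range (2 ^ r.length)).map
            (fun b => ([(fun a => if cmt (ch :: r) a then v else 0) (2*b),
                        (fun a => if cmt (ch :: r) a then v else 0) (2*b+1)] : List Int).sum)).sum
        = ((List.range (2 ^ r.length)).map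
            (fun b => if cmt r b then (if ch = 'X' then 2 * v else v) else 0)).sum := by
          congr 1
          apply List.map_congr_left
          intro b _
          simpa using hterm b
      _ = (if ch = 'X' then 2 * v else v) * 2 ^ (r.count 'X') := ih _
      _ = v * 2 ^ ((ch :: r).count 'X') := by
          by_cases hX : ch = 'X'
          · simp [hX, pow_succ]; ring
          · simp [hX]

theorem memVal_of_no_match (mem : List (List Char × Int)) (a : Nat)
    (h : ∀ p ∈ mem, cmt p.1 a = false) : memVal mem a = 0 := by
  induction mem with
  | nil => rfl
  | cons e r ih =>
    simp only [memVal]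
    rw [h e (by simp), ih (fun p hp => h p (by simp [hp]))]
    simp

def NADDR : Nat := 2 ^ 36

theorem NADDR_eq : NADDR = 2 ^ 36 := rfl

theorem sum_map_zero {α : Type} (l : List α) : (l.map (fun _ => (0 : Int))).sum = 0 := by
  induction l with
  | nil => rfl
  | cons x t ih => simp

theorem mem_sum (mem : List (List Char × Int)) (hw : WfMem mem) (hdj : DisjMem mem) :
    ((List.range NADDR).map (fun a => memVal mem a)).sum
      = (mem.map (fun p => p.2 * 2 ^ (PySem.List.count p.1 'X'))).sum := by
  induction mem with
  | nil =>
    rw [show (fun a : Nat => memVal [] a) = (fun _ : Nat => (0 : Int)) from rfl,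
        sum_map_zero]
    rfl
  | cons e rest ih =>
    have hwe : WfCube e.1 := hw e (by simp)
    have hwr : WfMem rest := fun p hp => hw p (by simp [hp])
    have hdr : DisjMem rest := hdj.sublist (List.sublist_cons_self e rest)
    have hpt : ∀ a : Nat, memVal (e :: rest) a
        = (if cmt e.1 a then e.2 else 0) + memVal rest a := by
      intro a
      simp only [memVal]
      cases hce : cmt e.1 a with
      | true =>
        rw [memVal_of_no_match rest a (by
          intro p hp
          by_contra hne
          exact (List.pairwise_cons.mp hdj).1 p hp a ⟨hce, by simpa using hne⟩)]
        simp
      | false => simp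
    rw [List.map_cons, List.sum_cons, ← ih hwr hdr]
    rw [List.map_congr_left (fun a _ => hpt a), PySem.List.sum_map_add_int]
    have hc := cube_sum e.1 e.2
    have hN : NADDR = 2 ^ e.1.length := by rw [hwe.1]; exact NADDR_eq
    rw [hN, hc]
    rfl

def patBase : List Char → Int
  | [] => 0
  | c :: r => (if c = '1' then 1 else 0) + 2 * patBase r

def patX : List Char → List Int
  | [] => []
  | c :: r => (if c = 'X' then [(1 : Int)] else []) ++ (patX r).map (2 * ·)

def ssum : List Int → Nat → Int
  | [], _ => 0
  | x :: r, d => (if d % 2 = 1 then x else 0) + ssum r (d / 2)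

theorem ssum_map_two (l : List Int) : ∀ d, ssum (l.map (2 * ·)) d = 2 * ssum l d := by
  induction l with
  | nil => intro d; simp [ssum]
  | cons x r ih =>
    intro d
    simp only [List.map_cons, ssum, ih (d / 2)]
    by_cases h : d % 2 = 1 <;> simp [h] <;> ring

theorem enum_iff (pat : List Char) : ∀ (key : Int),
    ((∃ d : Nat, d < 2 ^ (patX pat).length ∧ key = patBase pat + ssum (patX pat) d)
      ↔ (∃ a : Nat, cmt pat a = true ∧ key = (a : Int))) := by
  induction pat with
  | nil =>
    intro key
    constructor
    · rintro ⟨d, hd, rfl⟩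
      simp only [patX, List.length_nil, pow_zero, Nat.lt_one_iff] at hd
      subst hd
      exact ⟨0, by simp [cmt], by simp [patBase, patX, ssum]⟩
    · rintro ⟨a, ha, rfl⟩
      have : a = 0 := by simpa [cmt] using ha
      exact ⟨0, by norm_num [patX], by simp [this, patBase, patX, ssum]⟩
  | cons ch r ih =>
    intro key
    have hmod2 : ∀ n : Nat, (if n % 2 = 1 then (1:Int) else 0) = ((n % 2 : Nat) : Int) := by
      intro n
      rcases Nat.mod_two_eq_zero_or_one n with h | h <;> simp [h]
    by_cases hX : ch = 'X'
    · subst hX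
      have hx1 : patX ('X' :: r) = 1 :: (patX r).map (2 * ·) := by simp [patX]
      have hb1 : patBase ('X' :: r) = 2 * patBase r := by simp [patBase]
      rw [hx1, hb1]
      constructor
      · rintro ⟨d, hd, rfl⟩
        have hd2 : d / 2 < 2 ^ (patX r).length := by
          simp only [List.length_cons, List.length_map, pow_succ] at hd
          omega
        obtain ⟨a', ha', hkey⟩ := (ih (patBase r + ssum (patX r) (d / 2))).mp ⟨d / 2, hd2, rfl⟩
        refine ⟨d % 2 + 2 * a', ?_, ?_⟩
        · simp only [cmt_cons, hOk]
          have : (d % 2 + 2 * a') / 2 = a' := by omega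
          rw [this]; exact ha'
        · rw [show ssum (1 :: (patX r).map (2 * ·)) d
                = (if d % 2 = 1 then (1:Int) else 0) + 2 * ssum (patX r) (d / 2) from by
              rw [show ssum (1 :: (patX r).map (2 * ·)) d
                    = (if d % 2 = 1 then (1:Int) else 0) + ssum ((patX r).map (2 * ·)) (d / 2)
                  from rfl, ssum_map_two]]
          rw [hmod2 d]
          push_cast
          omega
      · rintro ⟨a, ha, rfl⟩
        have ha' : cmt r (a / 2) = true := by simpa [cmt_cons, hOk] using ha
        obtain ⟨d', hd', hkey⟩ := (ih ((a / 2 : Nat) : Int)).mpr ⟨a / 2, ha', rfl⟩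
        refine ⟨a % 2 + 2 * d', ?_, ?_⟩
        · simp only [List.length_cons, List.length_map, pow_succ]; omega
        · have e1 : (a % 2 + 2 * d') % 2 = a % 2 := by omega
          have e2 : (a % 2 + 2 * d') / 2 = d' := by omega
          rw [show ssum (1 :: (patX r).map (2 * ·)) (a % 2 + 2 * d')
                = (if (a % 2 + 2 * d') % 2 = 1 then (1:Int) else 0)
                  + ssum ((patX r).map (2 * ·)) ((a % 2 + 2 * d') / 2) from rfl,
              ssum_map_two, e1, e2, hmod2 a]
          omega
    · have hpatX : patX (ch :: r) = (patX r).map (2 * ·) := by simp [patX, hX]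
      have hpatB : patBase (ch :: r) = (if ch = '1' then 1 else 0) + 2 * patBase r := rfl
      have hhead : ∀ a : Nat, hOk ch a = (a % 2 == (if ch = '1' then 1 else 0)) := by
        intro a
        by_cases h1 : ch = '1' <;> simp [hOk, hX, h1]
      rw [hpatX, hpatB]
      constructor
      · rintro ⟨d, hd, rfl⟩
        rw [List.length_map] at hd
        obtain ⟨a', ha', hkey⟩ := (ih (patBase r + ssum (patX r) d)).mp ⟨d, hd, rfl⟩
        refine ⟨(if ch = '1' then 1 else 0) + 2 * a', ?_, ?_⟩
        · simp only [cmt_cons, hhead, Bool.and_eq_true, beq_iff_eq]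
          constructor
          · by_cases h1 : ch = '1' <;> simp [h1] <;> omega
          · have : ((if ch = '1' then 1 else 0) + 2 * a') / 2 = a' := by
              by_cases h1 : ch = '1' <;> simp [h1] <;> omega
            rw [this]; exact ha'
        · rw [ssum_map_two]
          by_cases h1 : ch = '1' <;> simp [h1] at hkey ⊢ <;> push_cast <;> omega
      · rintro ⟨a, ha, rfl⟩
        simp only [cmt_cons, hhead, Bool.and_eq_true, beq_iff_eq] at ha
        obtain ⟨d', hd', hkey⟩ := (ih ((a / 2 : Nat) : Int)).mpr ⟨a / 2, ha.2, rfl⟩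
        refine ⟨d', by rwa [List.length_map], ?_⟩
        rw [ssum_map_two]
        have ha2 : ((a : Int)) = (if ch = '1' then 1 else 0) + 2 * ((a / 2 : Nat) : Int) := by
          have := ha.1
          by_cases h1 : ch = '1' <;> simp [h1] at this ⊢ <;> push_cast <;> omega
        rw [ha2, hkey]
        ring

def trit (mask : List Char) (a : Int) (j : Nat) : Char :=
  let ch := PySem.List.pyGetD mask ((35 : Int) - (j : Int)) ' '
  if ch = 'X' then 'X'
  else if ch = '1' ∨ PySem.Int.band (a >>> j) 1 ≠ 0 then '1'
  else '0'

theorem b_cube_eq (mask : String) (a : Int) :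
    b_cube mask a = (List.range 36).map (trit mask.toList a) := by
  rw [b_cube, show ((36:Int)) = ((36:Nat):Int) from rfl, PySem.List.pyRange_zero_nat]
  rw [List.foldl_map]
  rw [show (fun (cube : List Char) (k : Nat) =>
        (fun (cube : List Char) (j : Int) =>
          let ch := PySem.List.pyGetD mask.toList (35 - j) ' '
          if ch = 'X' then cube ++ ['X']
          else if ch = '1' ∨ PySem.Int.band (a >>> j.toNat) 1 ≠ 0 then cube ++ ['1']
          else cube ++ ['0']) cube ((k : Nat) : Int))
      = (fun (cube : List Char) (k : Nat) => cube ++ [trit mask.toList a k]) from by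
    funext cube k
    simp only [trit, Int.toNat_natCast]
    split_ifs <;> rfl]
  rw [PySem.List.foldl_append_singleton_eq_map]
  rfl

theorem trit_step (mask : List Char) (A : Nat) (n : Nat) (hn : n ≤ 35)
    (b0 : Int) (xs : List Int) :
    a_maskStep mask (((A >>> (35 - n) : Nat) : Int), b0, (2 : Int) ^ (35 - n), xs) ((n : Nat) : Int)
      = (((A >>> (36 - n) : Nat) : Int),
         b0 + (if trit mask (A : Int) (35 - n) = '1' then (2 : Int) ^ (35 - n) else 0),
         (2 : Int) ^ (36 - n),
         xs ++ (if trit mask (A : Int) (35 - n) = 'X' then [(2 : Int) ^ (35 - n)] else [])) := by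
  have e1 : PySem.Int.mod ((A >>> (35 - n) : Nat) : Int) 2
      = (((A >>> (35 - n)) % 2 : Nat) : Int) := by
    exact_mod_cast PySem.Int.mod_natCast (A >>> (35 - n)) 2
  have e2 : PySem.Int.truncdiv ((A >>> (35 - n) : Nat) : Int) 2
      = ((A >>> (36 - n) : Nat) : Int) := by
    have h1 : A >>> (36 - n) = (A >>> (35 - n)) / 2 := by
      rw [show 36 - n = (35 - n) + 1 by omega]
      simp [Nat.shiftRight_succ]
    rw [h1]; rfl
  have e3 : PySem.Int.band ((A : Int) >>> (35 - n)) 1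
      = (((A >>> (35 - n)) % 2 : Nat) : Int) := by
    rw [← Int.natCast_shiftRight]
    simpa [Nat.and_one_is_mod] using PySem.Int.band_natCast (A >>> (35 - n)) 1
  have hidx : (35 : Int) - ((35 - n : Nat) : Int) = ((n : Nat) : Int) := by
    push_cast; omega
  have hpow : (2:Int) ^ (35 - n) * 2 = (2:Int) ^ (36 - n) := by
    rw [show 36 - n = (35 - n) + 1 by omega]; ring
  simp only [trit, hidx]
  rcases Nat.mod_two_eq_zero_or_one (A >>> (35 - n)) with hr | hr <;>
  · by_cases hX : PySem.List.pyGetD mask ((n : Nat) : Int) ' ' = 'X' <;>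
    by_cases h1 : PySem.List.pyGetD mask ((n : Nat) : Int) ' ' = '1' <;>
    · simp only [a_maskStep, e1, e2, e3, hr, hX, h1]
      simp [hpow]

theorem maskLoop_eq (mask : List Char) (A : Nat) :
    ∀ n : Nat, n ≤ 36 → ∀ (b0 : Int) (xs0 : List Int),
      (PySem.List.pyRange ((n : Int) - 1) (-1) (-1)).foldl (a_maskStep mask)
          (((A >>> (36 - n) : Nat) : Int), b0, (2 : Int) ^ (36 - n), xs0)
        = (((A >>> 36 : Nat) : Int),
           b0 + 2 ^ (36 - n) * patBase (((List.range 36).map (trit mask (A : Int))).drop (36 - n)),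
           (2 : Int) ^ 36,
           xs0 ++ (patX (((List.range 36).map (trit mask (A : Int))).drop (36 - n))).map
             (fun w => 2 ^ (36 - n) * w)) := by
  intro n
  induction n with
  | zero =>
    intro _ b0 xs0
    rw [show ((0:Nat):Int) - 1 = -1 by norm_num,
        PySem.List.pyRange_neg_one_eq_nil (by norm_num)]
    rw [List.drop_eq_nil_of_le (by simp)]
    simp [patBase, patX]
  | succ n ih =>
    intro hn b0 xs0
    have hn35 : n ≤ 35 := by omega
    have e : (((n+1 : Nat)) : Int) - 1 = (n : Int) := by push_cast; ring
    have hcons : PySem.List.pyRange ((((n+1 : Nat)) : Int) - 1) (-1) (-1)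
        = ((n : Nat) : Int) :: PySem.List.pyRange ((n:Int) - 1) (-1) (-1) := by
      rw [e]
      exact PySem.List.pyRange_neg_one_cons (by
        have : (0:Int) ≤ (n:Int) := Int.natCast_nonneg n
        omega)
    have hdrop : ((List.range 36).map (trit mask (A : Int))).drop (36 - (n+1))
        = trit mask (A : Int) (35 - n)
          :: ((List.range 36).map (trit mask (A : Int))).drop (36 - n) := by
      have h1 : 36 - (n+1) = 35 - n := by omega
      have h2 : 36 - n = (35 - n) + 1 := by omega
      rw [h1, h2]
      rw [List.drop_eq_getElem_cons (by simp only [List.length_map, List.length_range]; omega)]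
      congr 1
      rw [List.getElem_map]
      congr 1
      simp
    rw [hcons, List.foldl_cons,
        show 36 - (n+1) = 35 - n from by omega,
        trit_step mask A n hn35 b0 xs0,
        show 36 - n = (35 - n) + 1 from by omega] at *
    rw [ih (by omega)]
    rw [hdrop]
    simp only [Prod.mk.injEq]
    refine ⟨trivial, ?_, trivial, ?_⟩
    · -- base component
      rw [show patBase (trit mask (↑A) (35 - n) :: ((List.range 36).map (trit mask ↑A)).drop ((35-n)+1))
            = (if trit mask (↑A) (35 - n) = '1' then 1 else 0)
              + 2 * patBase (((List.range 36).map (trit mask ↑A)).drop ((35-n)+1)) from rfl]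
      by_cases h1 : trit mask (↑A) (35 - n) = '1' <;> simp [h1, pow_succ] <;> ring
    · -- xpos component
      rw [show patX (trit mask (↑A) (35 - n) :: ((List.range 36).map (trit mask ↑A)).drop ((35-n)+1))
            = (if trit mask (↑A) (35 - n) = 'X' then [(1:Int)] else [])
              ++ (patX (((List.range 36).map (trit mask ↑A)).drop ((35-n)+1))).map (2 * ·) from rfl]
      by_cases hX : trit mask (↑A) (35 - n) = 'X' <;>
        simp [hX, List.map_map, pow_succ] <;>
        · congr 1
          funext w
          ring

theorem ssum_zero (l : List Int) : ssum l 0 = 0 := by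
  induction l with
  | nil => rfl
  | cons x r ih => simp [ssum, ih]

theorem a_inner_eq (xpos : List Int) :
    ∀ (d : Nat) (p : Nat) (m : Int), d < 2 ^ (xpos.length - p) →
      a_inner xpos d (p : Int) m = m + ssum (xpos.drop p) d := by
  intro d
  induction d using Nat.strong_induction_on with
  | _ d ih =>
    intro p m hd
    match d with
    | 0 => simp [a_inner, ssum_zero]
    | (d+1) =>
      have hp : p < xpos.length := by
        by_contra h
        have : xpos.length - p = 0 := by omega
        rw [this] at hd; omega
      have hdrop : xpos.drop p = xpos[p] :: xpos.drop (p+1) := List.drop_eq_getElem_cons hp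
      have hbound : (d+1)/2 < 2 ^ (xpos.length - (p+1)) := by
        have h2 : xpos.length - p = (xpos.length - (p+1)) + 1 := by omega
        rw [h2, pow_succ] at hd
        omega
      have hget : PySem.List.pyGetD xpos (p : Int) 0 = xpos[p] := by
        simp [PySem.List.pyGetD_natCast, List.getD_eq_getElem?_getD, List.getElem?_eq_getElem hp]
      have hrec := ih ((d+1)/2) (by omega) (p+1) (if (d+1) % 2 = 1 then m + xpos[p] else m) hbound
      rw [a_inner, hget]
      push_cast at hrec ⊢
      rw [hrec, hdrop, ssum]
      rcases Nat.mod_two_eq_zero_or_one (d+1) with h | h <;> simp [h] <;> ring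

theorem combine_mem (mask : String) (a : Int) (ha : 0 ≤ a) (key : Int) :
    key ∈ combine_mask2 mask a ↔ ∃ n : Nat, cmt (b_cube mask a) n = true ∧ key = (n : Int) := by
  obtain ⟨A, rfl⟩ : ∃ A : Nat, a = (A : Int) := ⟨a.toNat, Int.eq_natCast_toNat.mpr ha⟩
  have hml := maskLoop_eq mask.toList A 36 (by omega) 0 []
  rw [show ((36:Nat):Int) - 1 = 35 by norm_num,
      show 36 - 36 = 0 from rfl, pow_zero] at hml
  rw [show A >>> 0 = A from rfl, List.drop_zero] at hml
  have hmap1 : (patX ((List.range 36).map (trit mask.toList (A : Int)))).map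
      (fun w => (1:Int) * w) = patX ((List.range 36).map (trit mask.toList (A : Int))) := by
    simp
  rw [hmap1, zero_add, one_mul, List.nil_append] at hml
  unfold combine_mask2
  rw [hml]
  simp only []
  set pat := (List.range 36).map (trit mask.toList (A : Int)) with hpat
  rw [show ((2:Int) ^ (patX pat).length) = ((2 ^ (patX pat).length : Nat) : Int) by push_cast; ring,
      PySem.List.pyRange_zero_nat,
      List.foldl_map, PySem.List.foldl_append_singleton_eq_map, List.nil_append]
  rw [b_cube_eq mask (A : Int), ← hpat]
  constructor
  · intro hk
    simp only [List.mem_map, List.mem_range] at hk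
    obtain ⟨d, hd, hkey⟩ := hk
    rw [Int.toNat_natCast] at hkey
    have := a_inner_eq (patX pat) d 0 (patBase pat) (by simpa using hd)
    rw [show ((0:Nat):Int) = 0 from rfl] at this
    rw [this, List.drop_zero] at hkey
    exact (enum_iff pat key).mp ⟨d, hd, hkey.symm⟩
  · intro hk
    obtain ⟨d, hd, hkey⟩ := (enum_iff pat key).mpr hk
    simp only [List.mem_map, List.mem_range]
    refine ⟨d, hd, ?_⟩
    rw [Int.toNat_natCast]
    have := a_inner_eq (patX pat) d 0 (patBase pat) (by simpa using hd)
    rw [show ((0:Nat):Int) = 0 from rfl] at this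
    rw [this, List.drop_zero]
    exact hkey.symm

def GoodKeys (d : PySem.Dict Int Int) : Prop :=
  d.keys.Nodup ∧ ∀ k ∈ d.keys, ∃ a : Nat, a < 2 ^ 36 ∧ k = (a : Int)

theorem sum_map_filter_of_zero {α : Type} (p : α → Bool) (g : α → Int) :
    ∀ (l : List α), (∀ x ∈ l, p x = false → g x = 0) →
      ((l.filter p).map g).sum = (l.map g).sum := by
  intro l
  induction l with
  | nil => simp
  | cons x t ih =>
    intro h
    rw [List.filter_cons]
    cases hp : p x with
    | true =>
      simp only [if_pos rfl]
      simp [ih (fun y hy => h y (List.mem_cons_of_mem x hy))]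
    | false =>
      simp only [Bool.false_eq_true, if_false, List.map_cons, List.sum_cons]
      rw [h x (by simp) hp, ih (fun y hy => h y (by simp [hy]))]
      simp

theorem dict_sum (d : PySem.Dict Int Int) (hg : GoodKeys d) :
    d.keys.foldl (fun s m => s + d.getD m 0) 0
      = ((List.range NADDR).map (fun a => d.getD ((a : Nat) : Int) 0)).sum := by
  rw [PySem.List.foldl_add d.keys (fun m => d.getD m 0) 0, zero_add]
  have hsplit := sum_map_filter_of_zero (fun a : Nat => decide ((a : Int) ∈ d.keys))
    (fun a : Nat => d.getD (a : Int) 0) (List.range NADDR)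
    (by
      intro x _ hx
      apply PySem.Dict.getD_of_not_contains
      rw [← Bool.not_eq_true, PySem.Dict.contains_iff_mem_keys]
      simpa using hx)
  rw [← hsplit]
  have hperm : (((List.range NADDR).filter (fun a : Nat => decide ((a : Int) ∈ d.keys))).map
      (fun a : Nat => (a : Int))).Perm d.keys := by
    rw [List.perm_ext_iff_of_nodup
        ((((List.nodup_range).filter _).map (fun a b => Int.natCast_inj.mp)))
        hg.1]
    intro k
    simp only [List.mem_map, List.mem_filter, List.mem_range, decide_eq_true_eq]
    constructor
    · rintro ⟨a, ⟨_, hk⟩, rfl⟩; exact hk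
    · intro hk
      obtain ⟨a, ha, rfl⟩ := hg.2 k hk
      exact ⟨a, ⟨by rw [NADDR_eq]; exact ha, hk⟩, rfl⟩
  calc (List.map (fun m => d.getD m 0) d.keys).sum
      = (List.map (fun k : Int => d.getD k 0)
          (((List.range NADDR).filter (fun a : Nat => decide ((a : Int) ∈ d.keys))).map
            (fun a : Nat => (a : Int)))).sum := ((hperm.map (fun k : Int => d.getD k 0)).sum_eq).symm
    _ = (List.map (fun a : Nat => d.getD ((a : Nat) : Int) 0)
          ((List.range NADDR).filter (fun a : Nat => decide ((a : Int) ∈ d.keys)))).sum := by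
        rw [List.map_map]; rfl

theorem cmt_lt {c : List Char} {a : Nat} (h : cmt c a = true) : a < 2 ^ c.length := by
  induction c generalizing a with
  | nil => simp [cmt] at h; simp [h]
  | cons x r ih =>
    simp only [cmt, Bool.and_eq_true] at h
    have := ih h.2
    simp only [List.length_cons, pow_succ]
    omega

theorem b_cube_wf (mask : String) (a : Int) : WfCube (b_cube mask a) := by
  rw [b_cube_eq]
  constructor
  · simp
  · intro ch hch
    simp only [List.mem_map, List.mem_range] at hch
    obtain ⟨j, _, rfl⟩ := hch
    unfold trit
    dsimp only
    split_ifs <;> simp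

theorem getD_foldl_insert_const (addrs : List Int) (v : Int) (d : PySem.Dict Int Int) (key : Int) :
    (addrs.foldl (fun d m => d.insert m v) d).getD key 0
      = if key ∈ addrs then v else d.getD key 0 := by
  induction addrs generalizing d with
  | nil => simp
  | cons m t ih =>
    rw [List.foldl_cons, ih, PySem.Dict.getD_insert]
    by_cases h1 : key ∈ t <;> by_cases h2 : key = m <;> simp [h1, h2]

def INV (d : PySem.Dict Int Int) (mem : List (List Char × Int)) : Prop :=
  (∀ a : Nat, d.getD (a : Int) 0 = memVal mem a) ∧ GoodKeys d ∧ WfMem mem ∧ DisjMem mem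

theorem write_step (mask : String) (a0 v : Int) (ha : 0 ≤ a0)
    (d : PySem.Dict Int Int) (mem : List (List Char × Int)) (hinv : INV d mem) :
    INV ((combine_mask2 mask a0).foldl (fun d m => d.insert m v) d)
        ((mem.flatMap (fun p => (subCube p.1 (b_cube mask a0)).map (fun q => (q, p.2))))
          ++ [(b_cube mask a0, v)]) := by
  obtain ⟨hval, hg, hwf, hdj⟩ := hinv
  have hcube := b_cube_wf mask a0
  refine ⟨?_, ⟨?_, ?_⟩, ?_, ?_⟩
  · intro n
    rw [getD_foldl_insert_const, write_memVal mem _ v hwf hcube n]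
    have hmem : ((n : Nat) : Int) ∈ combine_mask2 mask a0 ↔ cmt (b_cube mask a0) n = true := by
      rw [combine_mem mask a0 ha]
      constructor
      · rintro ⟨m, hm, he⟩
        rwa [Int.natCast_inj.mp he]
      · intro h; exact ⟨n, h, rfl⟩
    by_cases hc : cmt (b_cube mask a0) n = true
    · rw [if_pos (hmem.mpr hc), if_pos hc]
    · rw [if_neg (fun h => hc (hmem.mp h)), if_neg hc, hval]
  · exact PySem.Dict.nodup_keys_foldl_insert (combine_mask2 mask a0) (fun _ _ => v) d hg.1
  · intro k hk
    rw [PySem.Dict.keys_foldl_insert (combine_mask2 mask a0) (fun _ _ => v) d] at hk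
    rcases (PySem.Set.mem_update d.keys (combine_mask2 mask a0) k).mp hk with h | h
    · exact hg.2 k h
    · obtain ⟨m, hm, rfl⟩ := (combine_mem mask a0 ha k).mp h
      refine ⟨m, ?_, rfl⟩
      have := cmt_lt hm
      rwa [hcube.1] at this
  · exact write_wf mem _ v hwf hcube
  · exact write_disj mem _ v hwf hdj hcube

theorem walk (input : List String) :
    ∀ (om : Option String) (mask : String) (d : PySem.Dict Int Int)
      (mem : List (List Char × Int)),
      preOk om input = true → (om = some mask ∨ om = none) → INV d mem →
      (input.foldl a_line (mask, d)).1 = (input.foldl b_line (mask, mem)).1 ∧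
      INV (input.foldl a_line (mask, d)).2 (input.foldl b_line (mask, mem)).2 := by
  induction input with
  | nil => intro om mask d mem _ _ hinv; exact ⟨rfl, hinv⟩
  | cons line rest ih =>
    intro om mask d mem hpre hom hinv
    by_cases hmask : PySem.Str.isIn "mask" line
    · simp only [preOk, hmask, if_true, Bool.and_eq_true] at hpre
      simp only [List.foldl_cons, a_line, b_line, hmask, if_true]
      exact ih (some _) _ d mem hpre.2 (Or.inl rfl) hinv
    · by_cases hmem : PySem.Str.isIn "mem" line
      · rcases hom with hom | hom
        · subst hom
          have hmask' : PySem.Str.isIn "mask" line = false := by simpa using hmask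
          simp only [preOk, hmask', hmem, Bool.false_eq_true,
            if_true, if_false, Bool.and_eq_true, decide_eq_true_eq] at hpre
          obtain ⟨⟨⟨⟨⟨hlen, hval⟩, hvok⟩, hbr⟩, haok⟩, hrest⟩ := hpre
          cases hparse : PySem.Int.ofStr? (PySem.List.pyGetD
              ((PySem.Str.splitMax? (PySem.List.pyGetD ((PySem.Str.splitMax? line "mem[" 1).getD []) 1 "") "]" 1).getD [])
              0 "") with
          | none => rw [hparse] at haok; simp at haok
          | some a0 =>
            rw [hparse] at haok
            simp only [decide_eq_true_eq] at haok
            simp only [List.foldl_cons]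
            rw [show a_line (mask, d) line
                  = (mask, (combine_mask2 mask ((PySem.Int.ofStr? (PySem.List.pyGetD
                      ((PySem.Str.splitMax? (PySem.List.pyGetD ((PySem.Str.splitMax? line "mem[" 1).getD []) 1 "") "]" 1).getD [])
                      0 "")).getD 0)).foldl
                      (fun d m => d.insert m ((PySem.Int.ofStr? (PySem.List.pyGetD ((PySem.Str.split? line " = ").getD []) 1 "")).getD 0)) d)
                from by
                  simp only [a_line]
                  rw [if_neg hmask, if_pos hmem],
               show b_line (mask, mem) line
                  = (mask, (mem.flatMap (fun p =>
                        (subCube p.1 (b_cube mask ((PySem.Int.ofStr? (PySem.List.pyGetD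
                          ((PySem.Str.splitMax? (PySem.List.pyGetD ((PySem.Str.splitMax? line "mem[" 1).getD []) 1 "") "]" 1).getD [])
                          0 "")).getD 0))).map (fun q => (q, p.2))))
                      ++ [(b_cube mask ((PySem.Int.ofStr? (PySem.List.pyGetD
                          ((PySem.Str.splitMax? (PySem.List.pyGetD ((PySem.Str.splitMax? line "mem[" 1).getD []) 1 "") "]" 1).getD [])
                          0 "")).getD 0),
                          (PySem.Int.ofStr? (PySem.List.pyGetD ((PySem.Str.split? line " = ").getD []) 1 "")).getD 0)])
                from by
                  simp only [b_line]
                  rw [if_neg hmask, if_pos hmem]]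
            rw [hparse]
            simp only [Option.getD_some]
            exact ih (some mask) mask _ _ hrest (Or.inl rfl)
              (write_step mask a0 _ haok.1 d mem hinv)
        · subst hom
          have hmask' : PySem.Str.isIn "mask" line = false := by simpa using hmask
          simp only [preOk, hmask', hmem, Bool.false_eq_true,
            if_true, if_false] at hpre
      · have hmask' : PySem.Str.isIn "mask" line = false := by simpa using hmask
        have hmem' : PySem.Str.isIn "mem" line = false := by simpa using hmem
        simp only [preOk, hmask', hmem', Bool.false_eq_true, if_false] at hpre
        simp only [List.foldl_cons,
          show a_line (mask, d) line = (mask, d) from by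
            simp only [a_line]; rw [if_neg hmask, if_neg hmem],
          show b_line (mask, mem) line = (mask, mem) from by
            simp only [b_line]; rw [if_neg hmask, if_neg hmem]]
        exact ih om mask d mem hpre hom hinv

-- ===== VERDICT (by name: the statement is the Claim_ definition above) =====
theorem calc_sum2_spec : Claim_equal_calc_sum2 := by
  intro input _dom hpre
  unfold Spec_calc_sum2 calc_sum2 calc_sum2_alt
  have hinv0 : INV PySem.Dict.empty [] := by
    refine ⟨fun a => rfl, ⟨PySem.Dict.nodup_keys_empty, by simp [PySem.Dict.keys_empty]⟩,
      by intro p hp; simp at hp, by simp [DisjMem]⟩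
  have hw := walk input none "" PySem.Dict.empty [] hpre (Or.inr rfl) hinv0
  obtain ⟨hval, hg, hwf, hdj⟩ := hw.2
  simp only []
  rw [dict_sum _ hg]
  rw [PySem.List.foldl_add ((input.foldl b_line ("", [])).2)
        (fun p => p.2 * 2 ^ (PySem.List.count p.1 'X')) 0]
  rw [← mem_sum _ hwf hdj]
  simp only [hval, zero_add]
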